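-- pv_equiv track=rewrite | github.com/Arkangel74/norre_kodi | plugin.video.tvspielfilm_de/resources/lib/common.py | cleanStation
-- ===== SOURCE A (Python) =====
-- def cleanStation(channelID):
-- 	ChannelCode = ('ARD','Das Erste','ONE','FES','ZDF','2NEO','ZNEO','2INFO','ZINFO','3SAT','Arte','ARTE','BR','HR','KIKA','MDR','NDR','N3','ORF','PHOEN','RBB','SR','SWR','SWR/SR','WDR','RTL','RTL2','VOX','SRTL','SUPER')
-- 	if channelID in ChannelCode and channelID != "":
-- 		for n in ((' ', ''), ('ARD', 'Das Erste'), ('DasErste', 'Das Erste'), ('FES', 'ONE'), ('Arte', 'ARTE'), ('2INFO', 'ZDFinfo'),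
-- 					('ZINFO', 'ZDFinfo'), ('2NEO', 'ZDFneo'), ('ZNEO', 'ZDFneo'), ('3SAT', '3sat'), ('N3', 'NDR'), ('PHOEN', 'PHOENIX'), ('SUPER', 'SRTL')):
-- 					channelID = channelID.replace(*n)
-- 		if ('SR' in channelID or 'SWR' in channelID) and not 'SRTL' in channelID:
-- 			channelID = 'SWR'
-- 	channelID = '  ('+channelID+')' if channelID != "" else channelID
-- 	return channelID
-- ===== SOURCE B (Python) =====
-- _GROUPS = (
--     ('Das Erste', ('ARD', 'Das Erste')),
--     ('ONE', ('ONE', 'FES')),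
--     ('ZDF', ('ZDF',)),
--     ('ZDFneo', ('2NEO', 'ZNEO')),
--     ('ZDFinfo', ('2INFO', 'ZINFO')),
--     ('3sat', ('3SAT',)),
--     ('ARTE', ('Arte', 'ARTE')),
--     ('NDR', ('NDR', 'N3')),
--     ('PHOENIX', ('PHOEN',)),
--     ('SWR', ('SR', 'SWR', 'SWR/SR')),
--     ('SRTL', ('SRTL', 'SUPER')),
--     ('BR', ('BR',)), ('HR', ('HR',)), ('KIKA', ('KIKA',)), ('MDR', ('MDR',)),
--     ('ORF', ('ORF',)), ('RBB', ('RBB',)), ('WDR', ('WDR',)), ('RTL', ('RTL',)),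
--     ('RTL2', ('RTL2',)), ('VOX', ('VOX',)),
-- )
--
-- def cleanStation(channelID):
--     for name, codes in _GROUPS:
--         if channelID in codes:
--             return '  (' + name + ')'
--     return '  (' + channelID + ')' if channelID != '' else channelID
-- ===== Notes on version B (the rewrite author's own statement) =====
-- stated objective: simpler
-- what changed: Replaces A's membership guard plus chain of 13 string replaces and the SR/SWR substring branch with a single early-return scan over a precomputed reverse table (final name -> codes mapping to it), wrapping the name on the first hit.
import Mathlib
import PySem

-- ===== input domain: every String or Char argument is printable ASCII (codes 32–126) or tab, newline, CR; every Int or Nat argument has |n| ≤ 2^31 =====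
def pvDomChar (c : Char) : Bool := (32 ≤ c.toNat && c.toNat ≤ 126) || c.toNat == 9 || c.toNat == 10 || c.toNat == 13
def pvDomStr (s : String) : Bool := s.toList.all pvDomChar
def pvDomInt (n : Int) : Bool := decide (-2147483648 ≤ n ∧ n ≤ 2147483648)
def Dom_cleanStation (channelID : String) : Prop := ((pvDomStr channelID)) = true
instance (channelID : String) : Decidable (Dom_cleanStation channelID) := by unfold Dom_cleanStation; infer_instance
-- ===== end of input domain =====

-- B replaces A's guarded chain of replaces and SR/SWR substring branch by an
-- early-return scan over a reverse table of final name -> codes (objective: simpler).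

-- ===== PORT A =====
def pvChannelCode : List String :=
  ["ARD","Das Erste","ONE","FES","ZDF","2NEO","ZNEO","2INFO","ZINFO","3SAT","Arte","ARTE",
   "BR","HR","KIKA","MDR","NDR","N3","ORF","PHOEN","RBB","SR","SWR","SWR/SR","WDR","RTL",
   "RTL2","VOX","SRTL","SUPER"]

def pvReplaces : List (String × String) :=
  [(" ", ""), ("ARD", "Das Erste"), ("DasErste", "Das Erste"), ("FES", "ONE"),
   ("Arte", "ARTE"), ("2INFO", "ZDFinfo"), ("ZINFO", "ZDFinfo"), ("2NEO", "ZDFneo"),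
   ("ZNEO", "ZDFneo"), ("3SAT", "3sat"), ("N3", "NDR"), ("PHOEN", "PHOENIX"),
   ("SUPER", "SRTL")]

def cleanStation (channelID : String) : String :=
  let c :=
    if pvChannelCode.contains channelID && channelID != "" then
      let c := pvReplaces.foldl (fun s p => PySem.Str.replace s p.1 p.2) channelID
      if (PySem.Str.isIn "SR" c || PySem.Str.isIn "SWR" c) && !(PySem.Str.isIn "SRTL" c)
      then "SWR" else c
    else channelID
  if c != "" then "  (" ++ c ++ ")" else c

-- ===== PORT B =====
def pvGroups : List (String × List String) :=
  [("Das Erste", ["ARD", "Das Erste"]),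
   ("ONE", ["ONE", "FES"]),
   ("ZDF", ["ZDF"]),
   ("ZDFneo", ["2NEO", "ZNEO"]),
   ("ZDFinfo", ["2INFO", "ZINFO"]),
   ("3sat", ["3SAT"]),
   ("ARTE", ["Arte", "ARTE"]),
   ("NDR", ["NDR", "N3"]),
   ("PHOENIX", ["PHOEN"]),
   ("SWR", ["SR", "SWR", "SWR/SR"]),
   ("SRTL", ["SRTL", "SUPER"]),
   ("BR", ["BR"]), ("HR", ["HR"]), ("KIKA", ["KIKA"]), ("MDR", ["MDR"]),
   ("ORF", ["ORF"]), ("RBB", ["RBB"]), ("WDR", ["WDR"]), ("RTL", ["RTL"]),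
   ("RTL2", ["RTL2"]), ("VOX", ["VOX"])]

-- the early-return 'for' loop of Source B, as structural recursion over the group table
def pvScanGroups : List (String × List String) → String → Option String
  | [], _ => none
  | (name, codes) :: rest, cid =>
      if codes.contains cid then some name else pvScanGroups rest cid

def cleanStation_alt (channelID : String) : String :=
  match pvScanGroups pvGroups channelID with
  | some name => "  (" ++ name ++ ")"
  | none => if channelID != "" then "  (" ++ channelID ++ ")" else channelID

-- ===== PRECONDITION & SPEC =====
def Spec_cleanStation (channelID : String) (out : String) : Prop := out = cleanStation_alt channelID
instance (channelID : String) (out : String) : Decidable (Spec_cleanStation channelID out) := by unfold Spec_cleanStation; infer_instance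

-- ===== CLAIM (what is proved, stated in full; the proofs are below) =====
def Claim_equal_cleanStation : Prop := ∀ (channelID : String), Dom_cleanStation channelID → Spec_cleanStation channelID (cleanStation channelID)

-- ===== LEMMAS AND PROOFS =====

-- On any string outside the 30-code list both programs only wrap: A skips its guarded
-- branch, and B's scan misses because every code in pvGroups is one of the 30.
theorem pv_scan_miss (s : String) (h : ¬ s ∈ pvChannelCode) :
    pvScanGroups pvGroups s = none := by
  have hall : ∀ g ∈ pvGroups, ∀ c ∈ g.2, c ∈ pvChannelCode := by decide
  revert hall
  generalize pvGroups = gs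
  intro hall
  induction gs with
  | nil => rfl
  | cons g rest ih =>
      obtain ⟨name, codes⟩ := g
      have hnc : codes.contains s = false := by
        rw [List.contains_eq_mem, decide_eq_false_iff_not]
        intro hm
        exact h (hall _ (List.mem_cons_self) _ hm)
      simp only [pvScanGroups, hnc]
      exact ih (fun g hg => hall g (List.mem_cons_of_mem _ hg))

theorem pv_miss (s : String) (h : ¬ s ∈ pvChannelCode) :
    cleanStation s = cleanStation_alt s := by
  simp [cleanStation, cleanStation_alt, h, pv_scan_miss s h]

-- ===== VERDICT (by name: the statement is the Claim_ definition above) =====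
set_option maxRecDepth 8000 in
theorem cleanStation_spec : Claim_equal_cleanStation := by
  intro channelID _
  unfold Spec_cleanStation
  by_cases h : channelID ∈ pvChannelCode
  · fin_cases h <;> decide
  · exact pv_miss channelID h
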